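-- pv_equiv track=rewrite | github.com/ChloeDMG/LASSO_CRF02 | aa_alignment_utilities.py | numbering_positions
-- ===== SOURCE A (Python) =====
-- def numbering_positions(aligned_reference):
--     '''Numbering an alignment based on the aligned reference sequence.
--     The positions are registred as posX. The gaps in the reference sequence
--     which are insertions in the sequences of the alignement are registred as posX_1.
--     IE:
--         >reference_sequence
--         CTR-PQ
--         >foo
--         CTRAPQ
--         >bar
--         C-KAPQ
--     will produce:
--         [pos1, pos2, pos3, pos3_1, pos4, pos5]
--
--     :param str aligned_reference: the string of aligned reference sequence of an alignment.
--     :return: the list of positions.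
--     :rtype: list of str
--     '''
--
--     positions_list = []
--     position_no_gap = 0
--     insertion = 1
--     for aa in aligned_reference:
--         if aa != '-':
--             insertion = 1
--             position_no_gap += 1
--             positions_list.append('pos{}'.format(position_no_gap))
--         else:
--             positions_list.append('pos{}_{}'.format(position_no_gap, insertion))
--             insertion += 1
--     return positions_list
-- ===== SOURCE B (Python) =====
-- def numbering_positions(aligned_reference):
--     '''Number alignment positions from the aligned reference; reference gaps
--     become insertion labels posX_j with j local to each maximal gap run.'''
--     out = []
--     pos = 0
--     i = 0
--     n = len(aligned_reference)
--     while i < n: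
--         is_gap = aligned_reference[i] == '-'
--         j = i
--         while j < n and (aligned_reference[j] == '-') == is_gap:
--             j += 1
--         k = j - i
--         if is_gap:
--             out.extend('pos{}_{}'.format(pos, t) for t in range(1, k + 1))
--         else:
--             out.extend('pos{}'.format(pos + t) for t in range(1, k + 1))
--             pos += k
--         i = j
--     return out
-- ===== Notes on version B (the rewrite author's own statement) =====
-- stated objective: alternative
-- what changed: B groups the reference into maximal gap/non-gap runs and emits each run's labels from a range in one shot (only a running non-gap counter is kept), instead of A's flat per-character loop with a reset insertion flag.
import Mathlib
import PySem

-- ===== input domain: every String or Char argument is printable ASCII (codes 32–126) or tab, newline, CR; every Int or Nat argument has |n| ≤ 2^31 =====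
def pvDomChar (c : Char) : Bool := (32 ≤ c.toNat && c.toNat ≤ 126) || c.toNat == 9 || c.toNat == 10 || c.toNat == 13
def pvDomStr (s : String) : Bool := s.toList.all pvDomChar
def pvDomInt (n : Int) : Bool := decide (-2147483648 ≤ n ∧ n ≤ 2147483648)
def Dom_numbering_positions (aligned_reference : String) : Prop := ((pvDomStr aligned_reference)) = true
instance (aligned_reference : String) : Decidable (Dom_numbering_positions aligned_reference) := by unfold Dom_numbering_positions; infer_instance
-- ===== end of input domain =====

-- One honest line: B emits labels run-by-run (maximal gap/non-gap runs) keeping only the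
-- non-gap counter, instead of A's per-character loop with a reset insertion flag; alternative
-- decomposition, same cost. Proved equal on every input.

-- ===== PORT A =====
-- A's for-loop over the characters with state (positions_list, position_no_gap, insertion).
-- loop body of A, as a named step function over the state (positions_list, position_no_gap, insertion)
def stepA (st : List String × Int × Int) (aa : Char) : List String × Int × Int :=
  let lst := st.1; let pos := st.2.1; let ins := st.2.2
  if aa ≠ '-' then
    (lst ++ ["pos" ++ PySem.Int.toStr (pos + 1)], pos + 1, 1)
  else
    (lst ++ ["pos" ++ PySem.Int.toStr pos ++ "_" ++ PySem.Int.toStr ins], pos, ins + 1)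

def numbering_positions (aligned_reference : String) : List String :=
  (aligned_reference.toList.foldl stepA ([], 0, 1)).1

-- ===== PORT B =====
-- B's outer while-loop over maximal runs: the run is found by scanning while the gap flag
-- matches (takeWhile/dropWhile = Source B's inner `while j < n and ...` scan), then the run's
-- labels are emitted from range(1, k+1) in one shot.
def npB_runs : List Char → Int → List String
  | [], _ => []
  | c :: cs, pos =>
    let g := c == '-'
    let r := cs.takeWhile (fun d => (d == '-') == g)
    let rest := cs.dropWhile (fun d => (d == '-') == g)
    let k := r.length + 1
    if g then
      ((List.range k).map (fun (t : Nat) =>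
        "pos" ++ PySem.Int.toStr pos ++ "_" ++ PySem.Int.toStr ((t : Int) + 1))) ++
        npB_runs rest pos
    else
      ((List.range k).map (fun (t : Nat) =>
        "pos" ++ PySem.Int.toStr (pos + ((t : Int) + 1)))) ++
        npB_runs rest (pos + (k : Int))
  termination_by l _ => l.length
  decreasing_by
    all_goals
      simp only [List.length_cons]
      exact Nat.lt_succ_of_le (List.length_dropWhile_le _ _)

def numbering_positions_alt (aligned_reference : String) : List String :=
  npB_runs aligned_reference.toList 0

-- ===== PRECONDITION & SPEC =====
def Spec_numbering_positions (aligned_reference : String) (out : List String) : Prop := out = numbering_positions_alt aligned_reference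
instance (aligned_reference : String) (out : List String) : Decidable (Spec_numbering_positions aligned_reference out) := by unfold Spec_numbering_positions; infer_instance

-- ===== CLAIM (what is proved, stated in full; the proofs are below) =====
def Claim_equal_numbering_positions : Prop := ∀ (aligned_reference : String), Dom_numbering_positions aligned_reference → Spec_numbering_positions aligned_reference (numbering_positions aligned_reference)

-- ===== LEMMAS AND PROOFS =====

-- A's loop in cons form.
def loopA : List Char → Int → Int → List String
  | [], _, _ => []
  | aa :: cs, pos, ins =>
    if aa ≠ '-' then
      ("pos" ++ PySem.Int.toStr (pos + 1)) :: loopA cs (pos + 1) 1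
    else
      ("pos" ++ PySem.Int.toStr pos ++ "_" ++ PySem.Int.toStr ins) :: loopA cs pos (ins + 1)

theorem foldA_eq_loopA (l : List Char) (acc : List String) (pos ins : Int) :
    (l.foldl stepA (acc, pos, ins)).1 = acc ++ loopA l pos ins := by
  induction l generalizing acc pos ins with
  | nil => simp [loopA]
  | cons aa cs ih =>
    rw [List.foldl_cons]
    by_cases h : aa = '-'
    · have hs : stepA (acc, pos, ins) aa
          = (acc ++ ["pos" ++ PySem.Int.toStr pos ++ "_" ++ PySem.Int.toStr ins], pos, ins + 1) := by
        simp [stepA, h]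
      rw [hs, ih]
      simp [loopA, h]
    · have hs : stepA (acc, pos, ins) aa
          = (acc ++ ["pos" ++ PySem.Int.toStr (pos + 1)], pos + 1, 1) := by
        simp [stepA, h]
      rw [hs, ih]
      simp [loopA, h]

-- loopA over a maximal non-gap run.
theorem loopA_nongap_run (r rest : List Char) (pos : Int)
    (hr : ∀ d ∈ r, d ≠ '-') :
    loopA (r ++ rest) pos 1 =
      ((List.range r.length).map (fun (t : Nat) => "pos" ++ PySem.Int.toStr (pos + ((t : Int) + 1)))) ++
        loopA rest (pos + (r.length : Int)) 1 := by
  induction r generalizing pos with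
  | nil => simp
  | cons d r' ih =>
    have hd : d ≠ '-' := hr d (by simp)
    rw [List.cons_append]
    simp only [loopA, if_pos hd]
    rw [ih (pos + 1) (fun x hx => hr x (List.mem_cons_of_mem _ hx))]
    simp only [List.length_cons, List.range_succ_eq_map, List.map_cons, List.map_map,
      List.cons_append]
    have h1 : pos + 1 + ((r'.length : Nat) : Int) = pos + (((r'.length + 1 : Nat) : Int)) := by
      push_cast; ring
    rw [h1]
    refine congrArg₂ List.cons ?_ (congrArg₂ (· ++ ·) ?_ rfl)
    · have : pos + (((0 : Nat) : Int) + 1) = pos + 1 := by push_cast; ring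
      rw [this]
    · apply List.map_congr_left
      intro t _
      simp only [Function.comp_apply]
      have : pos + 1 + ((t : Int) + 1) = pos + (((t.succ : Nat) : Int) + 1) := by
        push_cast; ring
      rw [this]

-- loopA over a maximal gap run.
theorem loopA_gap_run (r rest : List Char) (pos ins : Int)
    (hr : ∀ d ∈ r, d = '-') :
    loopA (r ++ rest) pos ins =
      ((List.range r.length).map (fun (t : Nat) =>
        "pos" ++ PySem.Int.toStr pos ++ "_" ++ PySem.Int.toStr (ins + (t : Int)))) ++
        loopA rest pos (ins + (r.length : Int)) := by
  induction r generalizing ins with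
  | nil => simp
  | cons d r' ih =>
    have hd : d = '-' := hr d (by simp)
    rw [List.cons_append]
    simp only [loopA, hd, ne_eq, not_true_eq_false, if_false]
    rw [ih (ins + 1) (fun x hx => hr x (List.mem_cons_of_mem _ hx))]
    simp only [List.length_cons, List.range_succ_eq_map, List.map_cons, List.map_map,
      List.cons_append]
    have h1 : ins + 1 + ((r'.length : Nat) : Int) = ins + (((r'.length + 1 : Nat) : Int)) := by
      push_cast; ring
    rw [h1]
    refine congrArg₂ List.cons ?_ (congrArg₂ (· ++ ·) ?_ rfl)
    · have : ins + ((0 : Nat) : Int) = ins := by push_cast; ring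
      rw [this]
    · apply List.map_congr_left
      intro t _
      simp only [Function.comp_apply]
      have : ins + 1 + (t : Int) = ins + ((t.succ : Nat) : Int) := by
        push_cast; ring
      rw [this]

-- loopA ignores the insertion counter when the list is empty or starts non-gap.
theorem loopA_ins_irrel (rest : List Char) (pos j : Int)
    (h : rest = [] ∨ ∃ d ds, rest = d :: ds ∧ d ≠ '-') :
    loopA rest pos j = loopA rest pos 1 := by
  rcases h with h | ⟨d, ds, rfl, hd⟩
  · subst h; rfl
  · simp [loopA, hd]

-- the main induction, bounded by a length fuel
theorem loopA_eq_npB_aux : ∀ (n : Nat) (l : List Char), l.length ≤ n →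
    ∀ pos, loopA l pos 1 = npB_runs l pos := by
  intro n
  induction n with
  | zero =>
    intro l hl pos
    have : l = [] := List.eq_nil_of_length_eq_zero (Nat.le_zero.mp hl)
    subst this; simp [loopA, npB_runs]
  | succ n ih =>
    intro l hl pos
    match l with
    | [] => simp [loopA, npB_runs]
    | c :: cs =>
      by_cases hg : c = '-'
      · -- gap run
        have hsplit : cs.takeWhile (fun d => (d == '-') == (c == '-'))
            ++ cs.dropWhile (fun d => (d == '-') == (c == '-')) = cs :=
          List.takeWhile_append_dropWhile
        have hall : ∀ d ∈ c :: cs.takeWhile (fun d => (d == '-') == (c == '-')), d = '-' := by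
          intro d hdm
          rcases List.mem_cons.mp hdm with h | h
          · simpa [h] using hg
          · have := List.mem_takeWhile_imp h
            simp [hg] at this
            exact this
        have h1 : loopA (c :: cs) pos 1
            = loopA ((c :: cs.takeWhile (fun d => (d == '-') == (c == '-')))
                ++ cs.dropWhile (fun d => (d == '-') == (c == '-'))) pos 1 := by
          rw [List.cons_append, hsplit]
        rw [h1, loopA_gap_run _ _ _ _ hall]
        have hrest : loopA (cs.dropWhile (fun d => (d == '-') == (c == '-'))) pos
              (1 + ((c :: cs.takeWhile (fun d => (d == '-') == (c == '-'))).length : Int))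
            = npB_runs (cs.dropWhile (fun d => (d == '-') == (c == '-'))) pos := by
          rw [loopA_ins_irrel]
          · exact ih _ (le_trans (List.length_dropWhile_le _ _) (Nat.le_of_succ_le_succ hl)) pos
          · rcases hrest_shape : cs.dropWhile (fun d => (d == '-') == (c == '-')) with _ | ⟨d, ds⟩
            · exact Or.inl rfl
            · refine Or.inr ⟨d, ds, rfl, ?_⟩
              have hne : cs.dropWhile (fun d => (d == '-') == (c == '-')) ≠ [] := by
                simp [hrest_shape]
              have hpd := List.head_dropWhile_not (fun d => (d == '-') == (c == '-')) hne
              have hhd : (cs.dropWhile (fun d => (d == '-') == (c == '-'))).head hne = d := by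
                simp [hrest_shape]
              rw [hhd] at hpd
              simp [hg] at hpd
              exact hpd
        rw [hrest]
        simp only [npB_runs]
        rw [if_pos (by simp [hg])]
        simp only [hg, List.length_cons]
        apply congrArg₂ _ _ rfl
        apply List.map_congr_left
        intro t _
        congr 2
        ring
      · -- non-gap run
        have hsplit : cs.takeWhile (fun d => (d == '-') == (c == '-'))
            ++ cs.dropWhile (fun d => (d == '-') == (c == '-')) = cs :=
          List.takeWhile_append_dropWhile
        have hall : ∀ d ∈ c :: cs.takeWhile (fun d => (d == '-') == (c == '-')), d ≠ '-' := by
          intro d hdm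
          rcases List.mem_cons.mp hdm with h | h
          · simpa [h] using hg
          · have := List.mem_takeWhile_imp h
            simp [hg] at this
            exact this
        have h1 : loopA (c :: cs) pos 1
            = loopA ((c :: cs.takeWhile (fun d => (d == '-') == (c == '-')))
                ++ cs.dropWhile (fun d => (d == '-') == (c == '-'))) pos 1 := by
          rw [List.cons_append, hsplit]
        rw [h1, loopA_nongap_run _ _ _ hall]
        rw [ih _ (le_trans (List.length_dropWhile_le _ _) (Nat.le_of_succ_le_succ hl))]
        simp only [npB_runs]
        rw [if_neg (by simp [hg])]
        simp only [List.length_cons]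

theorem loopA_eq_npB (l : List Char) (pos : Int) : loopA l pos 1 = npB_runs l pos :=
  loopA_eq_npB_aux l.length l (le_refl _) pos

-- ===== VERDICT (by name: the statement is the Claim_ definition above) =====
theorem numbering_positions_spec : Claim_equal_numbering_positions := by
  intro s _
  show numbering_positions s = numbering_positions_alt s
  unfold numbering_positions numbering_positions_alt
  rw [foldA_eq_loopA, List.nil_append, loopA_eq_npB]
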